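-- pv_equiv track=rewrite | github.com/patel-kirti/Sorting-algorithm | Strand_Sort.py | strand
-- ===== SOURCE A (Python) =====
-- def strand(l):
--     i, s = 0, [l.pop(0)]
--     while i < len(l):
--         if l[i] > s[-1]:
--             s.append(l.pop(i))
--         else:
--             i += 1
--     return s
-- ===== SOURCE B (Python) =====
-- def strand(l):
--     s = [l[0]]
--     rest = []
--     for x in l[1:]:
--         if x > s[-1]:
--             s.append(x)
--         else:
--             rest.append(x)
--     l[:] = rest
--     return s
-- ===== Notes on version B (the rewrite author's own statement) =====
-- stated objective: faster
-- what changed: one forward pass partitioning into strand and remainder (then l[:]=remainder), instead of repeated in-place l.pop(i) with an index walk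
import Mathlib
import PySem

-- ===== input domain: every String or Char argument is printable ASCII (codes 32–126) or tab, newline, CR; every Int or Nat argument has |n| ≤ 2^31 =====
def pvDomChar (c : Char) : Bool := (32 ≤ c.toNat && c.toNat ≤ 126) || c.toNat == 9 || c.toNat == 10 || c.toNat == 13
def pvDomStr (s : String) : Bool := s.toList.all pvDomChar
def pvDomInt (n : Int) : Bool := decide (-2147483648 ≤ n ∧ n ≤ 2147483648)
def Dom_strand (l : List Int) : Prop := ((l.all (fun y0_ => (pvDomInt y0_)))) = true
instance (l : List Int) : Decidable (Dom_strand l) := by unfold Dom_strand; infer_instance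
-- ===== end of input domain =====

-- B extracts the strand and the remainder in one forward pass (simpler than A's
-- in-place pop/index walk).  Both Pythons mutate l (A pops from it, B assigns
-- l[:] = remainder, the same final list); the equivalence proved here is about
-- the RETURN value only.

-- ===== PORT A =====
-- A's while loop: index i over the (shrinking) list l, strand accumulator s.
def strandLoop (l : List Int) (i : Nat) (s : List Int) : List Int :=
  if h : i < l.length then
    if l[i] > s.getLast! then
      strandLoop (l.eraseIdx i) i (s ++ [l[i]])
    else
      strandLoop l (i + 1) s
  else s
termination_by l.length - i
decreasing_by
  · simp [List.length_eraseIdx, h]; omega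
  · omega

def strand (l : List Int) : List Int :=
  match l with
  | [] => []            -- l.pop(0) raises IndexError here; excluded by Pre_strand
  | h :: t => strandLoop t 0 [h]

-- ===== PORT B =====
-- B's for loop over the tail: each element joins the strand or the remainder.
def strandAltLoop (last : Int) (xs : List Int) : List Int × List Int :=
  match xs with
  | [] => ([], [])
  | x :: xs =>
    if x > last then
      let (s, r) := strandAltLoop x xs
      (x :: s, r)
    else
      let (s, r) := strandAltLoop last xs
      (s, x :: r)

def strand_alt (l : List Int) : List Int :=
  match l with
  | [] => []            -- l[0] raises IndexError here; excluded by Pre_strand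
  | h :: t => h :: (strandAltLoop h t).1

-- ===== PRECONDITION & SPEC =====
-- Pre_ excludes only the empty list, on which both Pythons raise IndexError.
def Pre_strand (l : List Int) : Prop := l ≠ []
instance (l : List Int) : Decidable (Pre_strand l) := by unfold Pre_strand; infer_instance
def pvWitness_strand : List Int := [3, 1, 4, 1, 5]

def Spec_strand (l : List Int) (out : List Int) : Prop := out = strand_alt l
instance (l : List Int) (out : List Int) : Decidable (Spec_strand l out) := by unfold Spec_strand; infer_instance

-- ===== CLAIM (what is proved, stated in full; the proofs are below) =====
def Claim_equal_strand : Prop := ∀ (l : List Int), Dom_strand l → Pre_strand l → Spec_strand l (strand l)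

-- ===== LEMMAS AND PROOFS =====

-- A's loop equals s followed by the strand B extracts from the unvisited suffix.
theorem strandLoop_eq (l : List Int) (i : Nat) (s : List Int) (hs : s ≠ []) :
    strandLoop l i s = s ++ (strandAltLoop s.getLast! (l.drop i)).1 := by
  induction l, i, s using strandLoop.induct with
  | case1 l i s h hgt ih =>
    rw [strandLoop, dif_pos h, if_pos hgt, ih (by simp)]
    have hdrop : l.drop i = l[i] :: l.drop (i + 1) := (List.getElem_cons_drop h).symm
    have herase : (l.eraseIdx i).drop i = l.drop (i + 1) := by
      rw [List.eraseIdx_eq_take_drop_succ]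
      have hlen : (l.take i).length = i := List.length_take_of_le (Nat.le_of_lt h)
      rw [List.drop_append_of_le_length (le_of_eq hlen.symm)]
      simp
    rw [herase, hdrop, strandAltLoop, if_pos hgt]
    simp [List.getLast!_eq_getLast?_getD]
  | case2 l i s h hgt ih =>
    rw [strandLoop, dif_pos h, if_neg hgt, ih hs]
    have hdrop : l.drop i = l[i] :: l.drop (i + 1) := (List.getElem_cons_drop h).symm
    rw [hdrop, strandAltLoop, if_neg hgt]
  | case3 l i s h =>
    rw [strandLoop, dif_neg h]
    have : l.drop i = [] := List.drop_eq_nil_of_le (by omega)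
    simp [this, strandAltLoop]

-- ===== VERDICT (by name: the statement is the Claim_ definition above) =====
theorem strand_spec : Claim_equal_strand := by
  intro l _ hpre
  unfold Spec_strand
  match l with
  | [] => exact absurd rfl hpre
  | h :: t =>
    show strandLoop t 0 [h] = _
    rw [strandLoop_eq t 0 [h] (by simp)]
    simp [strand_alt, List.getLast!_eq_getLast?_getD]
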